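-- pv_equiv track=rewrite | github.com/algorithm-studyy/algorithm | jiwon/programmers/python/discount_event.py | solution
-- ===== SOURCE A (Python) =====
-- def solution(want, number, discount):
--     answer = 0
--     dic = {w: n for w, n in zip(want, number)}
--     hap = sum(number)
--     for i in range(len(discount) - hap + 1):
--         discount_dic = dict()
--         for j in range(i, hap + i):
--             if discount[j] not in discount_dic:
--                 discount_dic[discount[j]] = 1
--             else:
--                 discount_dic[discount[j]] += 1
--         if dic == discount_dic:
--             answer += 1
--     return answer
-- ===== SOURCE B (Python) =====
-- def solution(want, number, discount):
--     target = dict(zip(want, number))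
--     hap = sum(number)
--     n = len(discount)
--     if hap < 0 or hap > n:
--         return 0
--     window = {}
--     for item in discount[:hap]:
--         window[item] = window.get(item, 0) + 1
--     answer = 1 if window == target else 0
--     for i in range(hap, n):
--         x = discount[i]
--         window[x] = window.get(x, 0) + 1
--         y = discount[i - hap]
--         c = window[y] - 1
--         if c == 0:
--             del window[y]
--         else:
--             window[y] = c
--         if window == target:
--             answer += 1
--     return answer
-- ===== Notes on version B (the rewrite author's own statement) =====
-- stated objective: alternative
-- what changed: A rebuilds and recounts the whole window dict from scratch for every start index; B builds the first window's counter once and then slides the window, updating the counter incrementally (add the entering item, remove the leaving one) with one dict comparison per position.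
-- intended difference: On inputs with want == [] and sum(number) < 0, A returns len(discount)-sum(number)+1 (it counts phantom windows of negative size, each compared as an empty dict equal to the empty target), while B returns 0, the intended answer since no window of negative size exists. — e.g. on solution([], [-1], []): A returns 2, B returns 0
import Mathlib
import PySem

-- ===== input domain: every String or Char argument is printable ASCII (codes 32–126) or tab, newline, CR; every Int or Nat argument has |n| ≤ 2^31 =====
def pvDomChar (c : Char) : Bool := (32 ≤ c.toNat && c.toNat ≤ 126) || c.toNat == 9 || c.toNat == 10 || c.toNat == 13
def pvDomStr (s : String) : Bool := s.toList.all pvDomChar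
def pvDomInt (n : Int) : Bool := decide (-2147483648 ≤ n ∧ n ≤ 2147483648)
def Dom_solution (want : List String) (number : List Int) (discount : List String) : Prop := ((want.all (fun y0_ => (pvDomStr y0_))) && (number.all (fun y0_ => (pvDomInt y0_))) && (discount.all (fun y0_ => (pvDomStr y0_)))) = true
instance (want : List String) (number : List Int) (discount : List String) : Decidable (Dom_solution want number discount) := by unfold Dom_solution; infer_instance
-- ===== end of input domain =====

-- B replaces A's per-window recount by a sliding window whose counter is updated
-- incrementally, with one dict comparison per window position.

-- Python's `d1 == d2` on dicts: order-insensitive equality of key/value sets (used by both ports).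
def pyDictEq (d1 d2 : PySem.Dict String Int) : Bool :=
  d1.items.all (fun p => d2.get? p.1 == some p.2) && d2.items.all (fun p => d1.get? p.1 == some p.2)

-- ===== PORT A =====
def solution (want : List String) (number : List Int) (discount : List String) : Int :=
  let dic := (want.zip number).foldl (fun d p => d.insert p.1 p.2) PySem.Dict.empty
  let hap := number.sum
  (PySem.List.pyRange 0 ((discount.length : Int) - hap + 1) 1).foldl (fun answer i =>
    let dd := (PySem.List.pyRange i (hap + i) 1).foldl (fun dd j =>
      -- j is always a valid index when this inner loop runs (0 ≤ i, hap + i ≤ len), so pyGetD is exact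
      let x := PySem.List.pyGetD discount j ""
      if dd.contains x = false then dd.insert x 1 else dd.modify x 0 (· + 1)) PySem.Dict.empty
    if pyDictEq dic dd then answer + 1 else answer) 0

-- ===== PORT B =====
def solution_alt (want : List String) (number : List Int) (discount : List String) : Int :=
  let target := (want.zip number).foldl (fun d p => d.insert p.1 p.2) PySem.Dict.empty
  let hap := number.sum
  let n : Int := discount.length
  if hap < 0 ∨ n < hap then 0
  else
    let window := (PySem.List.slice discount (some 0) (some hap)).foldl
      (fun w item => w.insert item (w.getD item 0 + 1)) PySem.Dict.empty
    let answer : Int := if pyDictEq window target then 1 else 0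
    ((PySem.List.pyRange hap n 1).foldl (fun (st : PySem.Dict String Int × Int) i =>
      let x := PySem.List.pyGetD discount i ""
      let w1 := st.1.insert x (st.1.getD x 0 + 1)
      -- y is always a key of w1 here (it lies in the current window), so getD is exact for window[y]
      let y := PySem.List.pyGetD discount (i - hap) ""
      let c := w1.getD y 0 - 1
      let w2 := if c = 0 then w1.erase y else w1.insert y c
      (w2, if pyDictEq w2 target then st.2 + 1 else st.2))
      (window, answer)).2

-- ===== PRECONDITION & SPEC =====
-- On empty `want` with a negative total `sum(number)`, A counts len(discount)-sum(number)+1 phantom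
-- windows of negative size (each recounted as the empty dict, which equals the empty target) and
-- returns that positive count; B returns 0, the intended answer, as no window of negative size exists.
def D_solution (want : List String) (number : List Int) (discount : List String) : Prop :=
  want = [] ∧ number.sum < 0

instance (want : List String) (number : List Int) (discount : List String) : Decidable (D_solution want number discount) := by unfold D_solution; infer_instance

def Spec_solution (want : List String) (number : List Int) (discount : List String) (out : Int) : Prop := ¬ D_solution want number discount → out = solution_alt want number discount
instance (want : List String) (number : List Int) (discount : List String) (out : Int) : Decidable (Spec_solution want number discount out) := by unfold Spec_solution; infer_instance

def pvDiffWitness_solution : List String × List Int × List String := ([], [-1], [])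
def pvDiffWitnessOut_solution : Int × Int := (2, 0)

-- ===== CLAIM (what is proved, stated in full; the proofs are below) =====
def Claim_unchanged_solution : Prop := ∀ (want : List String) (number : List Int) (discount : List String), Dom_solution want number discount → Spec_solution want number discount (solution want number discount)
def Claim_changed_solution : Prop := Dom_solution (pvDiffWitness_solution.1) (pvDiffWitness_solution.2.1) (pvDiffWitness_solution.2.2) ∧ D_solution (pvDiffWitness_solution.1) (pvDiffWitness_solution.2.1) (pvDiffWitness_solution.2.2) ∧ solution (pvDiffWitness_solution.1) (pvDiffWitness_solution.2.1) (pvDiffWitness_solution.2.2) = pvDiffWitnessOut_solution.1 ∧ solution_alt (pvDiffWitness_solution.1) (pvDiffWitness_solution.2.1) (pvDiffWitness_solution.2.2) = pvDiffWitnessOut_solution.2 ∧ pvDiffWitnessOut_solution.1 ≠ pvDiffWitnessOut_solution.2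
def Claim_exact_solution : Prop := ∀ (want : List String) (number : List Int) (discount : List String), Dom_solution want number discount → D_solution want number discount → solution want number discount ≠ solution_alt want number discount

-- ===== LEMMAS AND PROOFS =====
-- proof helpers
def dicOf (want : List String) (number : List Int) : PySem.Dict String Int :=
  (want.zip number).foldl (fun d p => d.insert p.1 p.2) PySem.Dict.empty

def win (discount : List String) (hapN k : Nat) : List String := (discount.drop k).take hapN

def AStep (dic : PySem.Dict String Int) (discount : List String) (hapN : Nat) : Int → Nat → Int :=
  fun ans k => if pyDictEq dic (PySem.Dict.counter (win discount hapN k)) then ans + 1 else ans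

def Acount (dic : PySem.Dict String Int) (discount : List String) (hapN n : Nat) : Int :=
  (List.range n).foldl (AStep dic discount hapN) 0

def slideW (discount : List String) (hapN j : Nat) (W : PySem.Dict String Int) : PySem.Dict String Int :=
  let x := discount.getD (hapN + j) ""
  let w1 := W.insert x (W.getD x 0 + 1)
  let y := discount.getD j ""
  let c := w1.getD y 0 - 1
  if c = 0 then w1.erase y else w1.insert y c

def G (dic : PySem.Dict String Int) (discount : List String) (hapN : Nat) :
    PySem.Dict String Int × Int → Nat → PySem.Dict String Int × Int :=
  fun st j => (slideW discount hapN j st.1,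
    if pyDictEq (slideW discount hapN j st.1) dic then st.2 + 1 else st.2)

theorem get?_counter (l : List String) (k : String) :
    (PySem.Dict.counter l).get? k = (if l.count k = 0 then none else some (l.count k : Int)) := by
  have hc := PySem.Dict.contains_counter l k
  have hg := PySem.Dict.getD_counter l k
  rw [PySem.Dict.contains_eq_isSome_get?] at hc
  by_cases h : l.count k = 0
  · simp [h]
    have : l.contains k = false := by
      simp
      intro hm
      exact absurd (List.count_pos_iff.mpr hm) (by omega)
    rw [this] at hc
    cases hq : (PySem.Dict.counter l).get? k with
    | none => rfl
    | some v => rw [hq] at hc; simp at hc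
  · simp [h]
    have : l.contains k = true := by
      simp
      by_contra hm
      simp [List.count_eq_zero_of_not_mem hm] at h
    rw [this] at hc
    cases hq : (PySem.Dict.counter l).get? k with
    | none => rw [hq] at hc; simp at hc
    | some v =>
      simp only [PySem.Dict.getD, hq, Option.getD_some] at hg
      simp [hg]

theorem find?_filter_ne (l : List (String × Int)) (k k' : String) (h : k' ≠ k) :
    (l.filter (fun p => !(p.1 == k))).find? (fun p => p.1 == k') = l.find? (fun p => p.1 == k') := by
  induction l with
  | nil => rfl
  | cons p t ih =>
    by_cases hp : p.1 = k
    · simp [hp, Ne.symm h, ih]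
    · by_cases hq : p.1 = k'
      · simp [hq, h]
      · simp [hp, hq, ih]

theorem get?_erase (d : PySem.Dict String Int) (k k' : String) :
    (d.erase k).get? k' = (if k' = k then none else d.get? k') := by
  by_cases h : k' = k
  · subst h
    simp [PySem.Dict.erase, PySem.Dict.get?]
  · simp [PySem.Dict.erase, PySem.Dict.get?, h, find?_filter_ne d.items k k' h]

theorem nodup_keys_erase (d : PySem.Dict String Int) (k : String) (h : d.keys.Nodup) :
    (d.erase k).keys.Nodup := by
  have hs : (d.erase k).items.Sublist d.items := List.filter_sublist
  have hm : ((d.erase k).items.map Prod.fst).Sublist (d.items.map Prod.fst) := hs.map _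
  have hnd : (d.items.map Prod.fst).Nodup := by simpa [PySem.Dict.keys] using h
  simpa [PySem.Dict.keys] using hnd.sublist hm

theorem pyDictEq_comm (d1 d2 : PySem.Dict String Int) : pyDictEq d1 d2 = pyDictEq d2 d1 := by
  unfold pyDictEq; exact Bool.and_comm _ _

theorem pyDictEq_congr (t d d' : PySem.Dict String Int)
    (hg : ∀ k, d.get? k = d'.get? k) (hd : d.keys.Nodup) (hd' : d'.keys.Nodup) :
    pyDictEq t d = pyDictEq t d' := by
  unfold pyDictEq
  have h1 : t.items.all (fun p => d.get? p.1 == some p.2) = t.items.all (fun p => d'.get? p.1 == some p.2) :=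
    List.all_congr rfl (fun p => by rw [hg])
  rw [h1]
  congr 1
  rw [Bool.eq_iff_iff]
  simp only [List.all_eq_true]
  constructor
  · intro hall p hp
    obtain ⟨pk, pv⟩ := p
    have : d.get? pk = some pv := by
      rw [hg]
      exact (PySem.Dict.get?_eq_some_iff_mem_items d' pk pv hd').mpr hp
    exact hall (pk, pv) ((PySem.Dict.get?_eq_some_iff_mem_items d pk pv hd).mp this)
  · intro hall p hp
    obtain ⟨pk, pv⟩ := p
    have : d'.get? pk = some pv := by
      rw [← hg]
      exact (PySem.Dict.get?_eq_some_iff_mem_items d pk pv hd).mpr hp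
    exact hall (pk, pv) ((PySem.Dict.get?_eq_some_iff_mem_items d' pk pv hd').mp this)

theorem stepA_eq_modify (d : PySem.Dict String Int) (x : String) :
    (if d.contains x = false then d.insert x 1 else d.modify x 0 (· + 1)) = d.modify x 0 (· + 1) := by
  by_cases h : d.contains x = false
  · simp [h, PySem.Dict.modify, PySem.Dict.getD_of_not_contains d 0 h]
  · simp [h]

theorem map_pyGetD_range (xs : List String) (a b : Nat) (hab : a ≤ b) (hb : b ≤ xs.length) :
    (PySem.List.pyRange (a : Int) (b : Int) 1).map (fun j => PySem.List.pyGetD xs j "") =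
      (xs.drop a).take (b - a) := by
  rw [PySem.List.pyRange_one]
  have hn : ((b : Int) - (a : Int)).toNat = b - a := by omega
  rw [hn, List.map_map]
  apply List.ext_getElem
  · simp; omega
  · intro i h1 h2
    simp only [List.getElem_map, List.getElem_range, Function.comp_apply]
    have hcast : ((a : Int) + (i : Int)) = ((a + i : Nat) : Int) := by push_cast; ring
    have hlen : i < b - a := by simpa using h1
    rw [hcast, PySem.List.pyGetD_natCast, List.getElem_take, List.getElem_drop,
      List.getD_eq_getElem xs "" (by omega)]

theorem foldl_const {α : Type} (l : List α) (init : Int) :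
    l.foldl (fun a (_ : α) => a) init = init := by
  induction l generalizing init with
  | nil => rfl
  | cons x t ih => simpa using ih init

theorem foldl_add_one {α : Type} (l : List α) (init : Int) :
    l.foldl (fun a (_ : α) => a + 1) init = init + l.length := by
  induction l generalizing init with
  | nil => simp
  | cons x t ih => simp [ih]; omega

-- value of a window dict lookup as an Int count
theorem getD_of_get?_counter (W : PySem.Dict String Int) (l : List String) (q : String)
    (h : W.get? q = (PySem.Dict.counter l).get? q) : W.getD q 0 = (l.count q : Int) := by
  rw [PySem.Dict.getD_eq_get?_getD, h, get?_counter]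
  split <;> simp [*]

-- the heart: one incremental slide preserves the counter semantics of the window
theorem slide_step (discount : List String) (hapN k : Nat) (hk : hapN + k < discount.length)
    (W : PySem.Dict String Int)
    (hW : ∀ q, W.get? q = (PySem.Dict.counter (win discount hapN k)).get? q)
    (hnd : W.keys.Nodup) :
    (∀ q, (slideW discount hapN k W).get? q
        = (PySem.Dict.counter (win discount hapN (k + 1))).get? q)
    ∧ (slideW discount hapN k W).keys.Nodup := by
  have hkm : k < discount.length := by omega
  -- names
  set x := discount.getD (hapN + k) "" with hxdef
  set y := discount.getD k "" with hydef
  set l := win discount hapN k with hldef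
  set t := win discount hapN (k + 1) with htdef
  set mid := (discount.drop k).take (hapN + 1) with hmiddef
  have hx : x = discount[hapN + k] := List.getD_eq_getElem discount "" hk
  have hy : y = discount[k] := List.getD_eq_getElem discount "" hkm
  have f1 : l ++ [x] = mid := by
    rw [hldef, hmiddef, win, List.take_add_one]
    congr 1
    rw [List.getElem?_drop]
    rw [List.getElem?_eq_getElem (by omega : k + hapN < discount.length)]
    simp [hx, Nat.add_comm]
  have f2 : mid = y :: t := by
    rw [hmiddef, htdef, win, List.drop_eq_getElem_cons hkm, List.take_succ_cons, hy]
  -- w1 is the counter of mid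
  set w1 := W.insert x (W.getD x 0 + 1) with hw1def
  have hw1 : ∀ q, w1.get? q = (PySem.Dict.counter mid).get? q := by
    intro q
    rw [hw1def, PySem.Dict.get?_insert, get?_counter]
    by_cases hq : q = x
    · subst hq
      rw [getD_of_get?_counter W l x (hW x)]
      have : mid.count x = l.count x + 1 := by
        rw [← f1, List.count_append]; simp
      rw [this]
      simp
    · rw [if_neg hq, hW q, get?_counter]
      have : mid.count q = l.count q := by
        rw [← f1, List.count_append]
        simp [Ne.symm hq]
      rw [this]
  have hw1nd : w1.keys.Nodup := PySem.Dict.nodup_keys_insert W x _ hnd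
  have hcval : w1.getD y 0 - 1 = (t.count y : Int) := by
    rw [getD_of_get?_counter w1 mid y (hw1 y), f2, List.count_cons]
    simp
  constructor
  · intro q
    show (if w1.getD y 0 - 1 = 0 then w1.erase y else w1.insert y (w1.getD y 0 - 1)).get? q = _
    rw [hcval]
    by_cases hc0 : (t.count y : Int) = 0
    · rw [if_pos hc0, get?_erase, get?_counter]
      by_cases hq : q = y
      · subst hq
        rw [if_pos rfl, if_pos (by exact_mod_cast hc0)]
      · rw [if_neg hq, hw1 q, get?_counter]
        have : mid.count q = t.count q := by
          rw [f2, List.count_cons]; simp [Ne.symm hq]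
        rw [this]
    · rw [if_neg hc0, PySem.Dict.get?_insert]
      by_cases hq : q = y
      · subst hq
        rw [if_pos rfl, get?_counter, if_neg (by exact_mod_cast hc0)]
      · rw [if_neg hq, hw1 q, get?_counter, get?_counter]
        have : mid.count q = t.count q := by
          rw [f2, List.count_cons]; simp [Ne.symm hq]
        rw [this]
  · show (if w1.getD y 0 - 1 = 0 then w1.erase y else w1.insert y (w1.getD y 0 - 1)).keys.Nodup
    split
    · exact nodup_keys_erase w1 y hw1nd
    · exact PySem.Dict.nodup_keys_insert w1 y _ hw1nd

theorem Acount_succ (dic : PySem.Dict String Int) (discount : List String) (hapN n : Nat) :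
    Acount dic discount hapN (n + 1) = AStep dic discount hapN (Acount dic discount hapN n) n := by
  rw [Acount, Acount, List.range_succ, List.foldl_append]; rfl

-- sliding-window invariant for B's main loop
theorem B_inv (dic : PySem.Dict String Int) (discount : List String) (hapN n : Nat)
    (h : hapN + n ≤ discount.length) :
    ∃ W a, (List.range n).foldl (G dic discount hapN)
        (PySem.Dict.counter (win discount hapN 0), Acount dic discount hapN 1) = (W, a)
      ∧ (∀ q, W.get? q = (PySem.Dict.counter (win discount hapN n)).get? q)
      ∧ W.keys.Nodup ∧ a = Acount dic discount hapN (n + 1) := by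
  induction n with
  | zero => exact ⟨_, _, rfl, fun q => rfl, PySem.Dict.nodup_keys_counter _, rfl⟩
  | succ n ih =>
    obtain ⟨W, a, heq, hget, hnd, ha⟩ := ih (by omega)
    rw [List.range_succ, List.foldl_append, heq]
    have hk : hapN + n < discount.length := by omega
    obtain ⟨hs1, hs2⟩ := slide_step discount hapN n hk W hget hnd
    refine ⟨_, _, rfl, ?_, ?_, ?_⟩
    · simpa [G] using hs1
    · simpa [G] using hs2
    · simp only [List.foldl_cons, List.foldl_nil, G]
      have hcmp : pyDictEq (slideW discount hapN n W) dic
          = pyDictEq dic (PySem.Dict.counter (win discount hapN (n + 1))) := by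
        rw [pyDictEq_comm]
        exact pyDictEq_congr dic _ _ hs1 hs2 (PySem.Dict.nodup_keys_counter _)
      rw [hcmp, ha]
      conv_rhs => rw [Acount_succ]
      simp only [AStep]

theorem A_main (want : List String) (number : List Int) (discount : List String)
    (hapN : Nat) (hsum : number.sum = (hapN : Int)) (hm : hapN ≤ discount.length) :
    solution want number discount
      = Acount (dicOf want number) discount hapN (discount.length - hapN + 1) := by
  simp only [solution]
  rw [hsum]
  have h1 : (discount.length : Int) - (hapN : Int) + 1 = ((discount.length - hapN + 1 : Nat) : Int) := by
    push_cast [hm]; omega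
  rw [h1, PySem.List.pyRange_zero_natCast, List.foldl_map]
  rw [Acount]
  apply PySem.List.foldl_congr_mem
  intro ans k hkmem
  have hk : k ≤ discount.length - hapN := by
    rw [List.mem_range] at hkmem; omega
  have hstep : (fun (dd : PySem.Dict String Int) (j : Int) =>
      if dd.contains (PySem.List.pyGetD discount j "") = false
      then dd.insert (PySem.List.pyGetD discount j "") 1
      else dd.modify (PySem.List.pyGetD discount j "") 0 (· + 1))
      = fun dd j => dd.modify (PySem.List.pyGetD discount j "") 0 (· + 1) := by
    funext dd j; exact stepA_eq_modify dd _
  rw [hstep]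
  rw [← List.foldl_map (f := fun j => PySem.List.pyGetD discount j "")
    (g := fun (dd : PySem.Dict String Int) x => dd.modify x 0 (· + 1))]
  have h2 : ((hapN : Int) + (k : Int)) = ((k + hapN : Nat) : Int) := by push_cast; ring
  rw [h2, map_pyGetD_range discount k (k + hapN) (by omega) (by omega)]
  rw [← PySem.Dict.counter_eq_foldl]
  rw [AStep]
  have h3 : k + hapN - k = hapN := by omega
  rw [h3, win]
  simp only [dicOf]
  rfl

theorem B_main (want : List String) (number : List Int) (discount : List String)
    (hapN : Nat) (hsum : number.sum = (hapN : Int)) (hm : hapN ≤ discount.length) :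
    solution_alt want number discount
      = Acount (dicOf want number) discount hapN (discount.length - hapN + 1) := by
  simp only [solution_alt]
  rw [hsum]
  rw [if_neg (by push_cast; omega : ¬((hapN : Int) < 0 ∨ (discount.length : Int) < (hapN : Int)))]
  rw [PySem.List.slice_zero_start, PySem.List.slice_to_natCast,
    PySem.Dict.foldl_insert_getD_add_one_eq_counter]
  rw [PySem.List.pyRange_one]
  have h0 : ((discount.length : Int) - (hapN : Int)).toNat = discount.length - hapN := by omega
  rw [h0, List.foldl_map]
  set dic := dicOf want number with hdic
  have e1 : ∀ (j : Nat), PySem.List.pyGetD discount ((hapN : Int) + (j : Int)) "" = discount.getD (hapN + j) "" := by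
    intro j
    rw [show ((hapN : Int) + (j : Int)) = ((hapN + j : Nat) : Int) by push_cast; ring,
      PySem.List.pyGetD_natCast]
  have e2 : ∀ (j : Nat), PySem.List.pyGetD discount ((hapN : Int) + (j : Int) - (hapN : Int)) "" = discount.getD j "" := by
    intro j
    rw [show ((hapN : Int) + (j : Int) - (hapN : Int)) = ((j : Nat) : Int) by ring,
      PySem.List.pyGetD_natCast]
  refine Eq.trans (congrArg Prod.snd
    (PySem.List.foldl_congr_mem (List.range (discount.length - hapN)) _ (G dic discount hapN) _
      (fun st j _ => by simp only [e1 j, e2 j]; rfl))) ?_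
  have ha0 : (if pyDictEq (PySem.Dict.counter (discount.take hapN)) dic then (1 : Int) else 0)
      = Acount dic discount hapN 1 := by
    rw [Acount]
    simp only [List.range_succ, List.range_zero, List.nil_append, List.foldl_cons, List.foldl_nil]
    rw [AStep, pyDictEq_comm, win, List.drop_zero]
    simp
  rw [show List.foldl (fun (d : PySem.Dict String Int) (p : String × Int) => d.insert p.1 p.2) PySem.Dict.empty (want.zip number) = dic from rfl]
  rw [ha0]
  rw [show discount.take hapN = win discount hapN 0 from by rw [win, List.drop_zero]]
  obtain ⟨W, a, heq, _, _, ha⟩ := B_inv dic discount hapN (discount.length - hapN) (by omega)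
  rw [heq]
  rw [ha]

theorem insert_items_ne_nil (d : PySem.Dict String Int) (k : String) (v : Int) :
    (d.insert k v).items ≠ [] := by
  rw [PySem.Dict.insert]
  split
  · rename_i hcon
    rw [PySem.Dict.contains] at hcon
    rw [List.any_eq_true] at hcon
    obtain ⟨p, hp, _⟩ := hcon
    simp only [ne_eq, List.map_eq_nil_iff]
    exact List.ne_nil_of_mem hp
  · simp

theorem foldl_insert_items_ne_nil (l : List (String × Int)) (d : PySem.Dict String Int)
    (h : d.items ≠ []) :
    (l.foldl (fun d p => d.insert p.1 p.2) d).items ≠ [] := by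
  induction l generalizing d with
  | nil => exact h
  | cons p t ih => exact ih _ (insert_items_ne_nil d p.1 p.2)

theorem dicOf_items_ne_nil (want : List String) (number : List Int)
    (hw : want ≠ []) (hn : number ≠ []) : (dicOf want number).items ≠ [] := by
  rw [dicOf]
  cases want with
  | nil => exact absurd rfl hw
  | cons w ws =>
    cases number with
    | nil => exact absurd rfl hn
    | cons m ms =>
      rw [List.zip_cons_cons, List.foldl_cons]
      exact foldl_insert_items_ne_nil _ _ (insert_items_ne_nil _ _ _)

theorem pyDictEq_empty_right (d : PySem.Dict String Int) (h : d.items ≠ []) :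
    pyDictEq d PySem.Dict.empty = false := by
  unfold pyDictEq
  cases hd : d.items with
  | nil => exact absurd hd h
  | cons p t => simp [PySem.Dict.get?_empty]

-- A on a negative total with nonempty want: every window comparison fails
theorem A_neg (want : List String) (number : List Int) (discount : List String)
    (hneg : number.sum < 0) (hw : want ≠ []) : solution want number discount = 0 := by
  simp only [solution]
  have hn : number ≠ [] := by rintro rfl; simp at hneg
  have hitems := dicOf_items_ne_nil want number hw hn
  rw [dicOf] at hitems
  refine Eq.trans (PySem.List.foldl_congr_mem _ _ (fun (a : Int) (_ : Int) => a) 0 ?_)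
    (foldl_const _ 0)
  intro ans i _
  rw [PySem.List.pyRange_one_eq_nil (by omega : number.sum + i ≤ i)]
  rw [List.foldl_nil]
  rw [pyDictEq_empty_right _ hitems]
  simp

theorem B_zero (want : List String) (number : List Int) (discount : List String)
    (h : number.sum < 0 ∨ (discount.length : Int) < number.sum) :
    solution_alt want number discount = 0 := by
  simp only [solution_alt]
  rw [if_pos h]

theorem A_big (want : List String) (number : List Int) (discount : List String)
    (h : (discount.length : Int) < number.sum) : solution want number discount = 0 := by
  simp only [solution]
  rw [PySem.List.pyRange_one_eq_nil (by omega : (discount.length : Int) - number.sum + 1 ≤ 0)]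
  rw [List.foldl_nil]

theorem solution_eq_alt (want : List String) (number : List Int) (discount : List String)
    (hnd : ¬ (want = [] ∧ number.sum < 0)) :
    solution want number discount = solution_alt want number discount := by
  by_cases h1 : number.sum < 0
  · have hw : want ≠ [] := fun h => hnd ⟨h, h1⟩
    rw [A_neg _ _ _ h1 hw, B_zero _ _ _ (Or.inl h1)]
  · by_cases h2 : (discount.length : Int) < number.sum
    · rw [A_big _ _ _ h2, B_zero _ _ _ (Or.inr h2)]
    · push_neg at h1 h2
      have hsum : number.sum = (number.sum.toNat : Int) := by omega
      have hm : number.sum.toNat ≤ discount.length := by omega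
      rw [A_main _ _ _ _ hsum hm, B_main _ _ _ _ hsum hm]

theorem A_value_on_D (number : List Int) (discount : List String)
    (hneg : number.sum < 0) :
    solution [] number discount = (((discount.length : Int) - number.sum + 1).toNat : Int) := by
  simp only [solution, List.zip_nil_left, List.foldl_nil]
  refine Eq.trans (PySem.List.foldl_congr_mem _ _ (fun (a : Int) (_ : Int) => a + 1) 0 ?_) ?_
  · intro ans i _
    rw [PySem.List.pyRange_one_eq_nil (by omega : number.sum + i ≤ i)]
    rw [List.foldl_nil]
    simp [pyDictEq, PySem.Dict.empty]
  · rw [foldl_add_one, PySem.List.length_pyRange_one]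
    simp

-- ===== VERDICT (by name: the statement is the Claim_ definition above) =====
theorem solution_spec : Claim_unchanged_solution := by
  intro want number discount _
  unfold Spec_solution D_solution
  intro hnd
  exact solution_eq_alt want number discount hnd

theorem solution_changed : Claim_changed_solution := by
  unfold Claim_changed_solution; decide

theorem solution_tight : Claim_exact_solution := by
  intro want number discount _ hd
  unfold D_solution at hd
  obtain ⟨hw, hneg⟩ := hd
  subst hw
  rw [A_value_on_D number discount hneg, B_zero _ _ _ (Or.inl hneg)]
  have hm : (0 : Int) ≤ (discount.length : Int) := by positivity
  omega
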